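-- pv_equiv track=rewrite | github.com/m00sfett/stringen | stringen/utils.py | character_set_size
-- ===== SOURCE A (Python) =====
-- import string
--
-- def recognized_base(text: str) -> int:
--     """Return recognized numeric base of the given text.
--
--     The smallest base capable of representing all characters is returned.
--     Hexadecimal is only detected when letters ``a``-``f`` or ``A``-``F`` are
--     present.
--     """
--     if not text:
--         return 0
--     hex_chars = set("0123456789abcdefABCDEF")
--     text_set = set(text)
--     if text_set <= hex_chars and any(c.isalpha() for c in text):
--         return 16
--     if text_set <= {"0", "1"}:
--         return 2
--     if text_set <= set("01234567"):
--         return 8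
--     if text_set <= set(string.digits):
--         return 10
--     return 0
--
-- def character_set_size(text: str) -> int:
--     """Return the size of the character set present in ``text``."""
--     if not text:
--         return 0
--     base = recognized_base(text)
--     if base:
--         return base
--
--     size = 0
--     if any(c.islower() for c in text):
--         size += 26
--     if any(c.isupper() for c in text):
--         size += 26
--     if any(c.isdigit() for c in text):
--         size += 10
--     specials = {c for c in text if not c.isalnum()}
--     size += len(specials)
--
--     return size
-- ===== SOURCE B (Python) =====
-- def character_set_size(text: str) -> int:
--     """Return the size of the character set present in ``text``."""
--     if not text:
--         return 0
--     s = set(text)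
--     if s <= set("0123456789abcdefABCDEF") and any(c.isalpha() for c in s):
--         return 16
--     if s <= set("0123456789"):
--         m = max(s)
--         return 2 if m <= '1' else 8 if m <= '7' else 10
--     has_lower = has_upper = has_digit = False
--     specials = 0
--     for c in s:
--         if c.islower():
--             has_lower = True
--         elif c.isupper():
--             has_upper = True
--         elif c.isdigit():
--             has_digit = True
--         elif not c.isalnum():
--             specials += 1
--     return 26 * has_lower + 26 * has_upper + 10 * has_digit + specials
-- ===== Notes on version B (the rewrite author's own statement) =====
-- stated objective: alternative
-- what changed: B computes the distinct-character set once, derives the numeric base from the maximum digit character instead of A's subset cascade, and replaces A's four separate any()/set-comprehension passes over the text with a single flag-and-counter pass over the set.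
import Mathlib
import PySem

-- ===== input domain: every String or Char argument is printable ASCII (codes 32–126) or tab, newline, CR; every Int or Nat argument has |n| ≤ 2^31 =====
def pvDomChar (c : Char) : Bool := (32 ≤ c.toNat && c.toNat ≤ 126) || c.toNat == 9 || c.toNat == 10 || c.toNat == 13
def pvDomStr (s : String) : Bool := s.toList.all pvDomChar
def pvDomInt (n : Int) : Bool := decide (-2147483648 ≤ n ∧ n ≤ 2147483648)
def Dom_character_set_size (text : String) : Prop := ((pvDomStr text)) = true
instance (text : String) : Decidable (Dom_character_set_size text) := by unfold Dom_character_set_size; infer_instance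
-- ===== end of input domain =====

-- B builds the distinct-character set once, picks the numeric base from the maximum digit
-- character instead of A's subset cascade, and replaces A's four any()/set passes with a
-- single flag-and-counter pass over the set (alternative decomposition, same cost).

-- ===== PORT A =====
def recognized_base (text : String) : Int :=
  let l := text.toList
  if l = [] then 0
  else
    let hex_chars := PySem.Set.ofList "0123456789abcdefABCDEF".toList
    let text_set := PySem.Set.ofList l
    if PySem.Set.issubset text_set hex_chars && l.any PySem.Chars.isalpha then 16
    else if PySem.Set.issubset text_set (PySem.Set.ofList ['0', '1']) then 2
    else if PySem.Set.issubset text_set (PySem.Set.ofList "01234567".toList) then 8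
    else if PySem.Set.issubset text_set (PySem.Set.ofList "0123456789".toList) then 10
    else 0

def character_set_size (text : String) : Int :=
  let l := text.toList
  if l = [] then 0
  else
    let base := recognized_base text
    if base ≠ 0 then base
    else
      let size : Int := 0
      let size := if l.any PySem.Chars.islower then size + 26 else size
      let size := if l.any PySem.Chars.isupper then size + 26 else size
      let size := if l.any PySem.Chars.isdigit then size + 10 else size
      let specials := PySem.Set.ofList (l.filter (fun c => !PySem.Chars.isalnum c))
      size + PySem.Set.len specials

-- ===== PORT B =====
-- one step of B's flag-and-counter loop over the distinct-character set
def csssStep (st : Bool × Bool × Bool × Int) (c : Char) : Bool × Bool × Bool × Int :=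
  if PySem.Chars.islower c then (true, st.2.1, st.2.2.1, st.2.2.2)
  else if PySem.Chars.isupper c then (st.1, true, st.2.2.1, st.2.2.2)
  else if PySem.Chars.isdigit c then (st.1, st.2.1, true, st.2.2.2)
  else if !PySem.Chars.isalnum c then (st.1, st.2.1, st.2.2.1, st.2.2.2 + 1)
  else st

def character_set_size_alt (text : String) : Int :=
  let l := text.toList
  if l = [] then 0
  else
    let s := PySem.Set.ofList l
    if PySem.Set.issubset s (PySem.Set.ofList "0123456789abcdefABCDEF".toList)
        && s.any PySem.Chars.isalpha then 16
    else if PySem.Set.issubset s (PySem.Set.ofList "0123456789".toList) then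
      -- max(s); the none branch is unreachable (s nonempty after the empty guard)
      match PySem.List.max? s (fun c => c) with
      | some m => if m ≤ '1' then 2 else if m ≤ '7' then 8 else 10
      | none => 0
    else
      let r := s.foldl csssStep (false, false, false, 0)
      (if r.1 then (26 : Int) else 0) + (if r.2.1 then 26 else 0)
        + (if r.2.2.1 then 10 else 0) + r.2.2.2

-- ===== PRECONDITION & SPEC =====
def Spec_character_set_size (text : String) (out : Int) : Prop := out = character_set_size_alt text
instance (text : String) (out : Int) : Decidable (Spec_character_set_size text out) := by unfold Spec_character_set_size; infer_instance

-- ===== CLAIM (what is proved, stated in full; the proofs are below) =====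
def Claim_equal_character_set_size : Prop := ∀ (text : String), Dom_character_set_size text → Spec_character_set_size text (character_set_size text)

-- ===== LEMMAS AND PROOFS =====

-- per-character ASCII facts, transferred from a finite check over codes 0..126
set_option maxRecDepth 80000 in
lemma pv_ascii_fin : ∀ n : Fin 127,
    (PySem.Chars.islower (Char.ofNat n) = true → PySem.Chars.isupper (Char.ofNat n) = false ∧ PySem.Chars.isdigit (Char.ofNat n) = false ∧ PySem.Chars.isalnum (Char.ofNat n) = true) ∧
    (PySem.Chars.isupper (Char.ofNat n) = true → PySem.Chars.islower (Char.ofNat n) = false ∧ PySem.Chars.isdigit (Char.ofNat n) = false ∧ PySem.Chars.isalnum (Char.ofNat n) = true) ∧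
    (PySem.Chars.isdigit (Char.ofNat n) = true → PySem.Chars.islower (Char.ofNat n) = false ∧ PySem.Chars.isupper (Char.ofNat n) = false ∧ PySem.Chars.isalnum (Char.ofNat n) = true) := by
  decide

lemma pv_ascii (c : Char) (hc : c.toNat ≤ 126) :
    (PySem.Chars.islower c = true → PySem.Chars.isupper c = false ∧ PySem.Chars.isdigit c = false ∧ PySem.Chars.isalnum c = true) ∧
    (PySem.Chars.isupper c = true → PySem.Chars.islower c = false ∧ PySem.Chars.isdigit c = false ∧ PySem.Chars.isalnum c = true) ∧
    (PySem.Chars.isdigit c = true → PySem.Chars.islower c = false ∧ PySem.Chars.isupper c = false ∧ PySem.Chars.isalnum c = true) := by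
  have h := pv_ascii_fin ⟨c.toNat, by omega⟩
  simpa [Char.ofNat_toNat] using h

lemma pv_dom_le (c : Char) (hc : pvDomChar c = true) : c.toNat ≤ 126 := by
  simp [pvDomChar] at hc
  omega

-- facts about the ten digit characters
lemma pv_digit_facts : ∀ c ∈ "0123456789".toList,
    (c ≤ '1' ↔ c ∈ ['0', '1']) ∧ (c ≤ '7' ↔ c ∈ "01234567".toList) := by
  rw [show "0123456789".toList = ['0','1','2','3','4','5','6','7','8','9'] from rfl,
      show "01234567".toList = ['0','1','2','3','4','5','6','7'] from rfl]
  intro c hc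
  fin_cases hc <;> exact ⟨by decide, by decide⟩

lemma pv_01_sub : ∀ c ∈ ['0', '1'], c ∈ "0123456789".toList := by
  rw [show "0123456789".toList = ['0','1','2','3','4','5','6','7','8','9'] from rfl]
  intro c hc
  fin_cases hc <;> decide

lemma pv_oct_sub : ∀ c ∈ "01234567".toList, c ∈ "0123456789".toList := by
  rw [show "01234567".toList = ['0','1','2','3','4','5','6','7'] from rfl,
      show "0123456789".toList = ['0','1','2','3','4','5','6','7','8','9'] from rfl]
  intro c hc
  fin_cases hc <;> decide

-- any over set(l) = any over l
lemma pv_any_ofList (l : List Char) (p : Char → Bool) :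
    (PySem.Set.ofList l).any p = l.any p := by
  rcases h : l.any p with _ | _
  · simp only [List.any_eq_false] at h ⊢
    intro x hx
    exact h x ((PySem.Set.mem_ofList l x).mp hx)
  · simp only [List.any_eq_true] at h ⊢
    obtain ⟨x, hx, hpx⟩ := h
    exact ⟨x, (PySem.Set.mem_ofList l x).mpr hx, hpx⟩

-- characterization of B's flag-and-counter loop
lemma pv_foldl_csssStep (s : List Char) (hl hu hd : Bool) (sp : Int) :
    s.foldl csssStep (hl, hu, hd, sp) =
      (hl || s.any PySem.Chars.islower,
       hu || s.any (fun c => !PySem.Chars.islower c && PySem.Chars.isupper c),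
       hd || s.any (fun c => !PySem.Chars.islower c && !PySem.Chars.isupper c && PySem.Chars.isdigit c),
       sp + ((s.filter (fun c => !PySem.Chars.islower c && !PySem.Chars.isupper c && !PySem.Chars.isdigit c && !PySem.Chars.isalnum c)).length : Int)) := by
  induction s generalizing hl hu hd sp with
  | nil => simp
  | cons c t ih =>
    simp only [List.foldl_cons, List.any_cons, List.filter_cons, csssStep]
    split_ifs with h1 h2 h3 h4 <;> rw [ih] <;> clear ih <;> simp_all <;> push_cast <;> omega

-- ===== VERDICT (by name: the statement is the Claim_ definition above) =====
theorem character_set_size_spec : Claim_equal_character_set_size := by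
  intro text hdom
  unfold Spec_character_set_size character_set_size character_set_size_alt recognized_base
  have hdom' : ∀ c ∈ text.toList, c.toNat ≤ 126 := by
    intro c hc
    exact pv_dom_le c (by
      have := hdom
      unfold Dom_character_set_size pvDomStr at this
      exact List.all_eq_true.mp this c hc)
  revert hdom'
  generalize text.toList = l
  intro hdom'
  by_cases hnil : l = []
  · simp [hnil]
  simp only [hnil, if_false]
  have hmemS : ∀ c, c ∈ PySem.Set.ofList l ↔ c ∈ l := fun c => PySem.Set.mem_ofList l c
  -- the hex condition is the same in both (any over the set = any over the list)
  rw [pv_any_ofList]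
  by_cases hhex : (PySem.Set.issubset (PySem.Set.ofList l) (PySem.Set.ofList "0123456789abcdefABCDEF".toList) && l.any PySem.Chars.isalpha) = true
  · simp only [if_pos hhex]
    norm_num
  rw [Bool.not_eq_true] at hhex
  simp only [hhex, Bool.false_eq_true, if_false]
  by_cases hdig : PySem.Set.issubset (PySem.Set.ofList l) (PySem.Set.ofList "0123456789".toList) = true
  · -- numeric case: A's cascade vs B's max-digit rule
    have hdig' : ∀ c ∈ l, c ∈ "0123456789".toList := by
      intro c hc
      have := (PySem.Set.issubset_iff _ _).mp hdig c ((hmemS c).mpr hc)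
      simpa [hmemS, PySem.Set.mem_ofList] using this
    have hSne : PySem.Set.ofList l ≠ [] := by
      intro h
      rcases l with _ | ⟨x, t⟩
      · exact hnil rfl
      · have : x ∈ PySem.Set.ofList (x :: t) := (hmemS x).mpr (by simp)
        rw [h] at this; simp at this
    obtain ⟨m, hm⟩ : ∃ m, PySem.List.max? (PySem.Set.ofList l) (fun c => c) = some m := by
      rcases h : PySem.List.max? (PySem.Set.ofList l) (fun c => c) with _ | m
      · exact absurd ((PySem.List.max?_eq_none_iff _ _).mp h) hSne
      · exact ⟨m, rfl⟩
    have hmmem : m ∈ l := (hmemS m).mp (PySem.List.max?_mem hm)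
    have hmax : ∀ y ∈ l, y ≤ m := fun y hy => PySem.List.max?_isMax hm y ((hmemS y).mpr hy)
    have hmdig := hdig' m hmmem
    simp only [if_pos hdig, hm]
    by_cases hm1 : m ≤ '1'
    · -- everything is ≤ '1': subset of {'0','1'}
      have h01 : PySem.Set.issubset (PySem.Set.ofList l) (PySem.Set.ofList ['0', '1']) = true := by
        rw [PySem.Set.issubset_iff]
        intro x hx
        have hxl := (hmemS x).mp hx
        have := ((pv_digit_facts x (hdig' x hxl)).1).mp (le_trans (hmax x hxl) hm1)
        simpa [PySem.Set.mem_ofList] using this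
      simp only [if_pos h01, if_pos hm1]
      norm_num
    · -- m is a digit > '1', so {'0','1'} is not a superset
      have h01 : PySem.Set.issubset (PySem.Set.ofList l) (PySem.Set.ofList ['0', '1']) = false := by
        rw [Bool.eq_false_iff]
        intro h
        have := (PySem.Set.issubset_iff _ _).mp h m ((hmemS m).mpr hmmem)
        rw [PySem.Set.mem_ofList] at this
        exact hm1 ((pv_digit_facts m hmdig).1.mpr this)
      by_cases hm7 : m ≤ '7'
      · have hoct : PySem.Set.issubset (PySem.Set.ofList l) (PySem.Set.ofList "01234567".toList) = true := by
          rw [PySem.Set.issubset_iff]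
          intro x hx
          have hxl := (hmemS x).mp hx
          have := ((pv_digit_facts x (hdig' x hxl)).2).mp (le_trans (hmax x hxl) hm7)
          simpa [PySem.Set.mem_ofList] using this
        simp only [h01, Bool.false_eq_true, if_false, if_pos hoct, if_neg hm1, if_pos hm7]
        norm_num
      · have hoct : PySem.Set.issubset (PySem.Set.ofList l) (PySem.Set.ofList "01234567".toList) = false := by
          rw [Bool.eq_false_iff]
          intro h
          have := (PySem.Set.issubset_iff _ _).mp h m ((hmemS m).mpr hmmem)
          rw [PySem.Set.mem_ofList] at this
          exact hm7 ((pv_digit_facts m hmdig).2.mpr this)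
        simp only [h01, hoct, Bool.false_eq_true, if_false, if_neg hm1, if_neg hm7]
        norm_num
  · -- non-numeric case: A's cascade all fails, fallback sums agree
    have hdig' : PySem.Set.issubset (PySem.Set.ofList l) (PySem.Set.ofList "0123456789".toList) = false :=
      Bool.not_eq_true _ ▸ (by simpa using hdig)
    have h01 : PySem.Set.issubset (PySem.Set.ofList l) (PySem.Set.ofList ['0', '1']) = false := by
      rw [Bool.eq_false_iff]
      intro h
      apply hdig
      rw [PySem.Set.issubset_iff] at h ⊢
      intro x hx
      have := h x hx
      rw [PySem.Set.mem_ofList] at this ⊢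
      exact pv_01_sub x this
    have hoct : PySem.Set.issubset (PySem.Set.ofList l) (PySem.Set.ofList "01234567".toList) = false := by
      rw [Bool.eq_false_iff]
      intro h
      apply hdig
      rw [PySem.Set.issubset_iff] at h ⊢
      intro x hx
      have := h x hx
      rw [PySem.Set.mem_ofList] at this ⊢
      exact pv_oct_sub x this
    simp only [h01, hoct, hdig', Bool.false_eq_true, if_false]
    rw [if_neg (show ¬((0 : Int) ≠ 0) by norm_num), pv_foldl_csssStep]
    -- the three flags
    have hflag1 : (PySem.Set.ofList l).any PySem.Chars.islower = l.any PySem.Chars.islower :=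
      pv_any_ofList l _
    have hflag2 : (PySem.Set.ofList l).any (fun c => !PySem.Chars.islower c && PySem.Chars.isupper c)
        = l.any PySem.Chars.isupper := by
      rw [pv_any_ofList]
      rcases h : l.any PySem.Chars.isupper with _ | _
      · simp only [List.any_eq_false] at h ⊢
        intro x hx
        have := h x hx
        simp_all
      · simp only [List.any_eq_true] at h ⊢
        obtain ⟨x, hx, hpx⟩ := h
        refine ⟨x, hx, ?_⟩
        have := ((pv_ascii x (hdom' x hx)).2.1 hpx).1
        simp [this, hpx]
    have hflag3 : (PySem.Set.ofList l).any (fun c => !PySem.Chars.islower c && !PySem.Chars.isupper c && PySem.Chars.isdigit c)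
        = l.any PySem.Chars.isdigit := by
      rw [pv_any_ofList]
      rcases h : l.any PySem.Chars.isdigit with _ | _
      · simp only [List.any_eq_false] at h ⊢
        intro x hx
        have := h x hx
        simp_all
      · simp only [List.any_eq_true] at h ⊢
        obtain ⟨x, hx, hpx⟩ := h
        refine ⟨x, hx, ?_⟩
        have h1 := ((pv_ascii x (hdom' x hx)).2.2 hpx).1
        have h2 := ((pv_ascii x (hdom' x hx)).2.2 hpx).2.1
        simp [h1, h2, hpx]
    -- the specials count
    have hspec : ((PySem.Set.ofList l).filter (fun c => !PySem.Chars.islower c && !PySem.Chars.isupper c && !PySem.Chars.isdigit c && !PySem.Chars.isalnum c)).length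
        = (PySem.Set.ofList (l.filter (fun c => !PySem.Chars.isalnum c))).length := by
      apply List.Perm.length_eq
      apply (List.perm_ext_iff_of_nodup ?_ ?_).mpr
      · intro x
        simp only [List.mem_filter, PySem.Set.mem_ofList]
        constructor
        · rintro ⟨hx, hp⟩
          simp only [Bool.and_eq_true, Bool.not_eq_true'] at hp
          exact ⟨hx, by simp [hp.2]⟩
        · rintro ⟨hx, hp⟩
          simp only [Bool.not_eq_true'] at hp
          have ha := pv_ascii x (hdom' x hx)
          refine ⟨hx, ?_⟩
          have l1 : PySem.Chars.islower x = false := by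
            rcases h : PySem.Chars.islower x with _ | _
            · rfl
            · exact absurd (ha.1 h).2.2 (by simp [hp])
          have l2 : PySem.Chars.isupper x = false := by
            rcases h : PySem.Chars.isupper x with _ | _
            · rfl
            · exact absurd (ha.2.1 h).2.2 (by simp [hp])
          have l3 : PySem.Chars.isdigit x = false := by
            rcases h : PySem.Chars.isdigit x with _ | _
            · rfl
            · exact absurd (ha.2.2 h).2.2 (by simp [hp])
          simp [l1, l2, l3, hp]
      · exact (PySem.Set.nodup_ofList l).filter _
      · exact PySem.Set.nodup_ofList _
    rw [hflag1, hflag2, hflag3, hspec]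
    simp only [PySem.Set.len, Bool.false_or]
    split_ifs <;> omega

-- ===== VERDICT (by name: the statement is the Claim_ definition above) =====
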